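-- pv_equiv track=rewrite | github.com/AminMasoudi/typing-game | backend/api/util.py | calculate
-- ===== SOURCE A (Python) =====
-- def calculate(seq, original_seq):
--     score = 0
--     seq = seq.split()
--     original_seq = original_seq.split()
--     for i in range(len(original_seq)):
--         try:
--             if seq[i] == original_seq[i]:
--                 score += 1
--             else:
--                 score -= 1
--         except:
--             score -= 1
--     return score
-- ===== SOURCE B (Python) =====
-- def calculate(seq, original_seq):
--     s = seq.split()
--     o = original_seq.split()
--
--     def go(lo, hi):
--         # score contribution of original positions [lo, hi), divide and conquer
--         if hi - lo == 0:
--             return 0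
--         if hi - lo == 1:
--             return 1 if lo < len(s) and s[lo] == o[lo] else -1
--         mid = (lo + hi) // 2
--         return go(lo, mid) + go(mid, hi)
--
--     return go(0, len(o))
-- ===== Notes on version B (the rewrite author's own statement) =====
-- stated objective: alternative
-- what changed: Replaces the single index loop with try/except and a running +1/-1 accumulator by a divide-and-conquer recursion that splits the original word positions in half and sums the two halves' scores, with a direct per-position base case.
import Mathlib
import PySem

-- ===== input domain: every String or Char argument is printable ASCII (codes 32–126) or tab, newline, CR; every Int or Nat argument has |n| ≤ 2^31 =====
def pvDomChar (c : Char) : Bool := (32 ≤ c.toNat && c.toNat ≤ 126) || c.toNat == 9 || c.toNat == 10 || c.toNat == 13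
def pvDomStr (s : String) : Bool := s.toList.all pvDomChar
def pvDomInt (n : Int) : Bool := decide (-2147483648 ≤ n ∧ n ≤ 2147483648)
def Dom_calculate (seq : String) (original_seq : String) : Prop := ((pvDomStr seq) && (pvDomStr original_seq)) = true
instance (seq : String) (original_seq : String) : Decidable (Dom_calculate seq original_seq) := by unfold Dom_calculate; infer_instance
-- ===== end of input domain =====

-- B replaces A's index loop with try/except and a running +1/-1 accumulator by a
-- divide-and-conquer recursion over the original word positions; objective: alternative.
-- ===== PORT A =====
def calculate (seq : String) (original_seq : String) : Int :=
  let s := PySem.Str.split₀ seq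
  let o := PySem.Str.split₀ original_seq
  (PySem.List.pyRange 0 (o.length : Int) 1).foldl (fun score i =>
    match PySem.List.pyGet? s i, PySem.List.pyGet? o i with
    | some a, some b => if a = b then score + 1 else score - 1
    | _, _ => score - 1) 0

-- ===== PORT B =====
-- the inner recursive helper 'go' of Source B: score of original positions [lo, hi)
def goCalc (s : List String) (o : List String) (lo hi : Nat) : Int :=
  if hi - lo = 0 then 0
  else if hi - lo = 1 then
    (if lo < s.length ∧ s[lo]? = o[lo]? then 1 else -1)
  else
    let mid := (lo + hi) / 2
    goCalc s o lo mid + goCalc s o mid hi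
termination_by hi - lo
decreasing_by all_goals omega

def calculate_alt (seq : String) (original_seq : String) : Int :=
  let s := PySem.Str.split₀ seq
  let o := PySem.Str.split₀ original_seq
  goCalc s o 0 o.length

-- ===== PRECONDITION & SPEC =====
def Spec_calculate (seq : String) (original_seq : String) (out : Int) : Prop := out = calculate_alt seq original_seq
instance (seq : String) (original_seq : String) (out : Int) : Decidable (Spec_calculate seq original_seq out) := by unfold Spec_calculate; infer_instance

-- ===== CLAIM (what is proved, stated in full; the proofs are below) =====
def Claim_equal_calculate : Prop := ∀ (seq : String) (original_seq : String), Dom_calculate seq original_seq → Spec_calculate seq original_seq (calculate seq original_seq)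

-- ===== LEMMAS AND PROOFS =====

-- the per-position score both programs realise
def tSc (s o : List String) (i : Nat) : Int :=
  if i < s.length ∧ s[i]? = o[i]? then 1 else -1

-- the loop body of port A, named so the fold lemma applies syntactically
def stepF (s : List String) (o : List String) (score : Int) (i : Int) : Int :=
  match PySem.List.pyGet? s i, PySem.List.pyGet? o i with
  | some a, some b => if a = b then score + 1 else score - 1
  | _, _ => score - 1

lemma step_eq_t (s o : List String) (score : Int) (k : Nat) :
    stepF s o score (k : Int) = score + tSc s o k := by
  unfold stepF tSc
  rw [PySem.List.pyGet?_natCast, PySem.List.pyGet?_natCast]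
  rcases hs : s[k]? with _ | a
  · have : ¬ k < s.length := by simpa [List.getElem?_eq_none_iff] using hs
    rcases ho : o[k]? with _ | b <;> simp [this] <;> ring
  · have hks : k < s.length := (List.getElem?_eq_some_iff.mp hs).1
    rcases ho : o[k]? with _ | b
    · simp [hks]; ring
    · by_cases hab : a = b <;> simp [hks, hab] <;> ring

lemma foldA_eq_sum (s o : List String) (n : Nat) (c : Int) :
    (PySem.List.pyRange 0 (n : Int) 1).foldl (stepF s o) c
      = c + ∑ i ∈ Finset.range n, tSc s o i := by
  induction n generalizing c with
  | zero => simp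
  | succ m ih =>
    have h0 : (0 : Int) ≤ (m : Int) := by positivity
    have hcast : ((m + 1 : Nat) : Int) = (m : Int) + 1 := by push_cast; ring
    rw [hcast, PySem.List.pyRange_one_succ_right h0, List.foldl_append, ih]
    simp only [List.foldl_cons, List.foldl_nil, step_eq_t, Finset.sum_range_succ]
    ring

lemma goCalc_eq_sum (s o : List String) :
    ∀ d lo hi, hi - lo = d → lo ≤ hi →
      goCalc s o lo hi = ∑ i ∈ Finset.Ico lo hi, tSc s o i := by
  intro d
  induction d using Nat.strong_induction_on with
  | _ d ih =>
    intro lo hi hd hle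
    by_cases h0 : hi - lo = 0
    · have : hi = lo := by omega
      subst this
      rw [goCalc]
      simp
    · by_cases h1 : hi - lo = 1
      · have : hi = lo + 1 := by omega
        subst this
        rw [goCalc, if_neg h0, if_pos h1]
        rw [Finset.sum_Ico_eq_sum_range]
        simp [tSc]
      · have hmidlo : lo ≤ (lo + hi) / 2 := by omega
        have hmidhi : (lo + hi) / 2 ≤ hi := by omega
        rw [goCalc, if_neg h0, if_neg h1]
        show goCalc s o lo ((lo + hi) / 2) + goCalc s o ((lo + hi) / 2) hi = _
        rw [ih ((lo + hi) / 2 - lo) (by omega) lo ((lo + hi) / 2) rfl hmidlo,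
            ih (hi - (lo + hi) / 2) (by omega) ((lo + hi) / 2) hi rfl hmidhi,
            Finset.sum_Ico_consecutive _ hmidlo hmidhi]

-- ===== VERDICT (by name: the statement is the Claim_ definition above) =====
theorem calculate_spec : Claim_equal_calculate := by
  intro seq original_seq _
  unfold Spec_calculate calculate calculate_alt
  have hA : (PySem.List.pyRange 0 ((PySem.Str.split₀ original_seq).length : Int) 1).foldl
      (fun score i =>
        match PySem.List.pyGet? (PySem.Str.split₀ seq) i,
              PySem.List.pyGet? (PySem.Str.split₀ original_seq) i with
        | some a, some b => if a = b then score + 1 else score - 1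
        | _, _ => score - 1) 0
      = (PySem.List.pyRange 0 ((PySem.Str.split₀ original_seq).length : Int) 1).foldl
          (stepF (PySem.Str.split₀ seq) (PySem.Str.split₀ original_seq)) 0 := rfl
  rw [hA, foldA_eq_sum,
      goCalc_eq_sum _ _ _ 0 _ rfl (Nat.zero_le _),
      Finset.range_eq_Ico]
  ring
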